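-- pv_equiv track=rewrite | github.com/mchmir/repo-sql-py-adm | pyton/PY-ASW/parser-new-receptinsert.py | join_assignments
-- ===== SOURCE A (Python) =====
-- ASSIGN_PER_LINE = 6          # пар name=value на строку в выводе
--
-- def join_assignments(pairs):
--     items = [f"{k}={v}" for (k, v) in pairs if v is not None and k]
--     if not items:
--         return ''
--     chunks = []
--     for i in range(0, len(items), ASSIGN_PER_LINE):
--         chunks.append(','.join(items[i:i+ASSIGN_PER_LINE]))
--     indent = ' ' * 25
--     return chunks[0] if len(chunks) == 1 else (',\n' + indent).join(chunks)
-- ===== SOURCE B (Python) =====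
-- ASSIGN_PER_LINE = 6          # name=value pairs per output line
--
-- def join_assignments(pairs):
--     items = [f"{k}={v}" for (k, v) in pairs if v is not None and k]
--     if not items:
--         return ''
--     out = items[0]
--     idx = 1
--     for it in items[1:]:
--         out += (',\n' + ' ' * 25) if idx % ASSIGN_PER_LINE == 0 else ','
--         out += it
--         idx += 1
--     return out
-- ===== Notes on version B (the rewrite author's own statement) =====
-- stated objective: simpler
-- what changed: Replaces the chunks list (slice into 6-item chunks, comma-join each, then join chunks, with a len(chunks)==1 special case) by a single left-to-right pass that picks the separator before each item from idx % ASSIGN_PER_LINE.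
import Mathlib
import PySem

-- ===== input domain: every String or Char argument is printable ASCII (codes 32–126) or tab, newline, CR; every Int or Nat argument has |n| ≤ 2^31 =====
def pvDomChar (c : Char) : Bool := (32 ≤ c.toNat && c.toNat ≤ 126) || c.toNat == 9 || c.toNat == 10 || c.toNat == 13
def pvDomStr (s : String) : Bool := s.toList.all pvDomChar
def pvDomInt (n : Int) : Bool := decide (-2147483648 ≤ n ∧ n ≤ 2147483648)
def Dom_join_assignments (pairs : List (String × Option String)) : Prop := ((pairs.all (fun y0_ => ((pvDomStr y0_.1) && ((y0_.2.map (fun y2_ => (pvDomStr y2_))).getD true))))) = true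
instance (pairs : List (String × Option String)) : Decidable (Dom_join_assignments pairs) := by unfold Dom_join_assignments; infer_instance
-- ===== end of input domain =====

-- B replaces A's chunk-list construction and its len(chunks)==1 special case by one
-- separator-selecting pass (idx % 6 decides between ',' and ',\n'+indent): simpler, same O(n).

-- shared by both Pythons word for word: the comprehension
-- [f"{k}={v}" for (k, v) in pairs if v is not None and k]
def pvItems (pairs : List (String × Option String)) : List String :=
  pairs.filterMap (fun kv =>
    match kv.2 with
    | none => none
    | some v => if kv.1 = "" then none else some (kv.1 ++ "=" ++ v))

-- ' ' * 25
def pvIndent : String := String.ofList (List.replicate 25 ' ')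

-- ===== PORT A =====
def join_assignments (pairs : List (String × Option String)) : String :=
  let items := pvItems pairs
  if items = [] then ""
  else
    let chunks := (PySem.List.pyRange 0 (items.length : Int) 6).foldl
      (fun ch i =>
        ch ++ [PySem.Str.join "," (PySem.List.slice items (some i) (some (i + 6)))]) []
    if chunks.length = 1 then PySem.List.pyGetD chunks 0 ""
    else PySem.Str.join (",\n" ++ pvIndent) chunks

-- ===== PORT B =====
def join_assignments_alt (pairs : List (String × Option String)) : String :=
  let items := pvItems pairs
  match items with
  | [] => ""
  | x :: rest =>
    (rest.foldl
      (fun (st : String × Int) it =>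
        (st.1 ++ (if PySem.Int.mod st.2 6 = 0 then ",\n" ++ pvIndent else ",") ++ it,
         st.2 + 1))
      (x, 1)).1

-- ===== PRECONDITION & SPEC =====
def Spec_join_assignments (pairs : List (String × Option String)) (out : String) : Prop := out = join_assignments_alt pairs
instance (pairs : List (String × Option String)) (out : String) : Decidable (Spec_join_assignments pairs out) := by unfold Spec_join_assignments; infer_instance

-- ===== CLAIM (what is proved, stated in full; the proofs are below) =====
def Claim_equal_join_assignments : Prop := ∀ (pairs : List (String × Option String)), Dom_join_assignments pairs → Spec_join_assignments pairs (join_assignments pairs)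

-- ===== LEMMAS AND PROOFS =====

-- the tail of a comma join: ","-separated continuation
def pvJoinTail : List String → String
  | [] => ""
  | y :: ys => "," ++ y ++ pvJoinTail ys

-- the tail of B's one-pass join, starting at global index j
def pvG (j : Nat) : List String → String
  | [] => ""
  | y :: ys => (if j % 6 = 0 then ",\n" ++ pvIndent else ",") ++ y ++ pvG (j + 1) ys

-- A's chunk list, as structural recursion in steps of 6
def pvChunks (xs : List String) : List String :=
  if h : xs = [] then []
  else PySem.Str.join "," (xs.take 6) :: pvChunks (xs.drop 6)
termination_by xs.length
decreasing_by
  have : 0 < xs.length := List.length_pos_iff.mpr h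
  simp [List.length_drop]; omega

-- String-level join unfoldings (from the PySem.Chars lemmas)
theorem pvJoin_singleton (sep p : String) : PySem.Str.join sep [p] = p := by
  apply String.toList_inj.mp
  simp [PySem.Str.toList_join, PySem.Chars.join_singleton]

theorem pvJoin_cons_cons (sep p q : String) (rest : List String) :
    PySem.Str.join sep (p :: q :: rest) = p ++ sep ++ PySem.Str.join sep (q :: rest) := by
  apply String.toList_inj.mp
  simp [PySem.Str.toList_join, PySem.Chars.join_cons_cons]

theorem pvJoin_comma (x : String) (xs : List String) :
    PySem.Str.join "," (x :: xs) = x ++ pvJoinTail xs := by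
  induction xs generalizing x with
  | nil => simp [pvJoin_singleton, pvJoinTail]
  | cons y ys ih =>
      rw [pvJoin_cons_cons, ih y, pvJoinTail]
      simp [String.append_assoc]

theorem pvG_small (xs : List String) : ∀ j : Nat, 1 ≤ j → j + xs.length ≤ 6 →
    pvG j xs = pvJoinTail xs := by
  induction xs with
  | nil => intro j _ _; rfl
  | cons y ys ih =>
      intro j h1 h2
      simp only [List.length_cons] at h2
      have hj : j % 6 = j := Nat.mod_eq_of_lt (by omega)
      have hne : j % 6 ≠ 0 := by omega
      rw [pvG, ih (j + 1) (by omega) (by omega), pvJoinTail, if_neg hne]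

theorem pvG_append (as bs : List String) : ∀ j : Nat,
    pvG j (as ++ bs) = pvG j as ++ pvG (j + as.length) bs := by
  induction as with
  | nil => intro j; simp [pvG]
  | cons a as ih =>
      intro j
      rw [List.cons_append, pvG, pvG, ih (j + 1), List.length_cons,
        show j + (as.length + 1) = j + 1 + as.length by omega]
      simp [String.append_assoc]

theorem pvG_period (xs : List String) : ∀ j : Nat, pvG (j + 6) xs = pvG j xs := by
  induction xs with
  | nil => intro j; rfl
  | cons y ys ih =>
      intro j
      rw [pvG, pvG, Nat.add_mod_right]
      rw [show j + 6 + 1 = j + 1 + 6 by omega, ih (j + 1)]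

-- the foldl of B equals pvG
theorem pvB_fold (xs : List String) : ∀ (acc : String) (j : Nat),
    (xs.foldl
      (fun (st : String × Int) it =>
        (st.1 ++ (if PySem.Int.mod st.2 6 = 0 then ",\n" ++ pvIndent else ",") ++ it,
         st.2 + 1))
      (acc, (j : Int))).1 = acc ++ pvG j xs := by
  induction xs with
  | nil => intro acc j; simp [pvG]
  | cons y ys ih =>
      intro acc j
      have hm : PySem.Int.mod (j : Int) 6 = ((j % 6 : Nat) : Int) := by
        exact_mod_cast PySem.Int.mod_natCast j 6
      have hc : (PySem.Int.mod (j : Int) 6 = 0) ↔ (j % 6 = 0) := by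
        rw [hm]; exact_mod_cast Int.natCast_eq_zero
      simp only [List.foldl_cons]
      rw [show ((j : Int) + 1) = ((j + 1 : Nat) : Int) by push_cast; ring, ih]
      rw [pvG]
      by_cases h : j % 6 = 0
      · rw [if_pos (hc.mpr h), if_pos h]; simp [String.append_assoc]
      · rw [if_neg (fun hh => h (hc.mp hh)), if_neg h]; simp [String.append_assoc]

-- pyRange with step 6: nil and cons
theorem pvRange6_nil (a b : Int) (h : b ≤ a) : PySem.List.pyRange a b 6 = [] := by
  rw [PySem.List.pyRange_of_pos a b (by norm_num)]
  simp [show ¬ a < b by omega]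

theorem pvRange6_cons (a b : Int) (h : a < b) :
    PySem.List.pyRange a b 6 = a :: PySem.List.pyRange (a + 6) b 6 := by
  rw [PySem.List.pyRange_of_pos a b (by norm_num), PySem.List.pyRange_of_pos (a + 6) b (by norm_num)]
  by_cases h2 : a + 6 < b
  · have hn : ((b - a + 6 - 1) / 6).toNat = ((b - (a + 6) + 6 - 1) / 6).toNat + 1 := by omega
    rw [if_pos h, if_pos h2, hn, List.range_succ_eq_map]
    simp only [List.map_cons, List.map_map, Nat.cast_zero, mul_zero, add_zero,
      Function.comp_def]
    refine congrArg₂ _ rfl (List.map_congr_left ?_)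
    intro k _
    push_cast
    ring
  · have hn : ((b - a + 6 - 1) / 6).toNat = 1 := by omega
    rw [if_pos h, if_neg h2, hn]
    simp

-- A's chunk-building foldl equals pvChunks
theorem pvA_fold (items : List String) : ∀ (i : Nat) (acc : List String),
    (PySem.List.pyRange (i : Int) (items.length : Int) 6).foldl
      (fun ch idx =>
        ch ++ [PySem.Str.join "," (PySem.List.slice items (some idx) (some (idx + 6)))]) acc
    = acc ++ pvChunks (items.drop i) := by
  have key : ∀ (n i : Nat) (acc : List String), items.length - i ≤ n →
      (PySem.List.pyRange (i : Int) (items.length : Int) 6).foldl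
        (fun ch idx =>
          ch ++ [PySem.Str.join "," (PySem.List.slice items (some idx) (some (idx + 6)))]) acc
      = acc ++ pvChunks (items.drop i) := by
    intro n
    induction n with
    | zero =>
        intro i acc h
        rw [pvRange6_nil _ _ (by exact_mod_cast (by omega : items.length ≤ i)),
          List.foldl_nil, List.drop_eq_nil_of_le (by omega), pvChunks]
        simp
    | succ n ih =>
        intro i acc h
        by_cases hlt : i < items.length
        · rw [pvRange6_cons _ _ (by exact_mod_cast hlt), List.foldl_cons,
            show ((i : Int) + 6) = ((i + 6 : Nat) : Int) by push_cast; ring,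
            ih (i + 6) _ (by omega)]
          rw [PySem.List.slice_natCast,
            show ((i + 6 : Nat) - (i : Nat) : Nat) = 6 by omega]
          conv_rhs => rw [pvChunks]
          rw [dif_neg (by
            intro hnil
            have := congrArg List.length hnil
            simp at this
            omega)]
          simp [List.drop_drop, List.append_assoc]
        · rw [pvRange6_nil _ _ (by exact_mod_cast (by omega : items.length ≤ i)),
            List.foldl_nil, List.drop_eq_nil_of_le (by omega), pvChunks]
          simp
  intro i acc
  exact key (items.length - i) i acc le_rfl

theorem pvChunks_cons (x : String) (xs : List String) :
    pvChunks (x :: xs)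
      = PySem.Str.join "," ((x :: xs).take 6) :: pvChunks ((x :: xs).drop 6) := by
  rw [pvChunks, dif_neg (by simp)]

-- join over the chunk list is B's one pass
theorem pvChunks_join (n : Nat) : ∀ (x : String) (xs : List String), xs.length ≤ n →
    PySem.Str.join (",\n" ++ pvIndent) (pvChunks (x :: xs)) = x ++ pvG 1 xs := by
  induction n using Nat.strong_induction_on with
  | _ n ih =>
    intro x xs hlen
    rw [pvChunks_cons,
      show (6 : Nat) = 5 + 1 by norm_num, List.take_succ_cons, List.drop_succ_cons]
    by_cases h5 : xs.length ≤ 5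
    · rw [List.drop_eq_nil_of_le h5, pvChunks, dif_pos rfl,
        List.take_of_length_le h5, pvJoin_singleton, pvJoin_comma,
        pvG_small xs 1 le_rfl (by omega)]
    · cases hr : xs.drop 5 with
      | nil =>
          exfalso
          have := congrArg List.length hr
          simp at this
          omega
      | cons y ys =>
          have hys : ys.length + 6 = xs.length := by
            have := congrArg List.length hr
            simp at this
            omega
          rw [pvChunks_cons y ys, pvJoin_cons_cons, ← pvChunks_cons y ys,
            ih ys.length (by omega) y ys le_rfl]
          have hG : pvG 1 xs = pvJoinTail (xs.take 5) ++ ((",\n" ++ pvIndent) ++ y ++ pvG 1 ys) := by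
            conv_lhs => rw [show xs = xs.take 5 ++ (y :: ys) from by rw [← hr, List.take_append_drop]]
            rw [pvG_append, List.length_take,
              show min 5 xs.length = 5 by omega,
              pvG_small (xs.take 5) 1 le_rfl (by rw [List.length_take]; omega),
              show (1 : Nat) + 5 = 6 by norm_num,
              show pvG 6 (y :: ys) = (",\n" ++ pvIndent) ++ y ++ pvG 7 ys from by
                norm_num [pvG]]
            rw [show (7 : Nat) = 1 + 6 by norm_num]
            rw [pvG_period ys 1]
          rw [hG, pvJoin_comma]
          simp [String.append_assoc]

-- ===== VERDICT (by name: the statement is the Claim_ definition above) =====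
theorem join_assignments_spec : Claim_equal_join_assignments := by
  intro pairs _
  unfold Spec_join_assignments join_assignments join_assignments_alt
  cases hi : pvItems pairs with
  | nil => simp
  | cons x xs =>
      simp only
      rw [if_neg (by simp)]
      have hA := pvA_fold (x :: xs) 0 []
      simp only [Nat.cast_zero, List.drop_zero, List.nil_append] at hA
      rw [hA]
      have hB := pvB_fold xs x 1
      simp only [Nat.cast_one] at hB
      rw [hB]
      by_cases hl : (pvChunks (x :: xs)).length = 1
      · rw [if_pos hl]
        obtain ⟨c, hc⟩ := List.length_eq_one_iff.mp hl
        rw [hc, PySem.List.pyGetD_zero_cons, ← pvJoin_singleton (",\n" ++ pvIndent) c, ← hc]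
        exact pvChunks_join xs.length x xs le_rfl
      · rw [if_neg hl]
        exact pvChunks_join xs.length x xs le_rfl
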